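-- pv_equiv track=rewrite | github.com/cabelotaina/formais | implementacao/renomeador_de_automatos.py | nomes_novos_estados
-- ===== SOURCE A (Python) =====
-- import string
--
-- def nomes_novos_estados(quantidade):
--     assert quantidade <= 676, 'Quantidade máxima excedida (estados possíveis: [A-ZZ])'
--
--     letras = list(string.ascii_uppercase)
--     del letras[18]
--     letras.insert(0, 'S')
--     lista = []
--     for i in range(0, quantidade):
--         indice_prefixo =  i // len(letras)
--         indice_letra = i - (indice_prefixo * len(letras))
--         prefixo = ''
--         if indice_prefixo > 0:
--             prefixo = letras[indice_prefixo]
--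
--         letra = letras[indice_letra ]
--         lista.append( prefixo + letra)
--     return lista
-- ===== SOURCE B (Python) =====
-- import string
--
-- def nomes_novos_estados(quantidade):
--     assert quantidade <= 676, 'Quantidade máxima excedida (estados possíveis: [A-ZZ])'
--
--     letras = list(string.ascii_uppercase)
--     del letras[18]
--     letras.insert(0, 'S')
--     lista = []
--     for p, c in enumerate(letras):
--         prefixo = '' if p == 0 else c
--         for letra in letras:
--             if len(lista) >= quantidade:
--                 return lista
--             lista.append(prefixo + letra)
--     return lista
-- ===== Notes on version B (the rewrite author's own statement) =====
-- stated objective: alternative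
-- what changed: Replaces the flat loop that derives each name by division/remainder (i//26, i%26) plus two list indexings with two nested loops over the alphabet itself (outer enumerate gives the prefix, inner gives the letter) and an early-exit length check, so no arithmetic or indexing is needed per element.
import Mathlib
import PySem

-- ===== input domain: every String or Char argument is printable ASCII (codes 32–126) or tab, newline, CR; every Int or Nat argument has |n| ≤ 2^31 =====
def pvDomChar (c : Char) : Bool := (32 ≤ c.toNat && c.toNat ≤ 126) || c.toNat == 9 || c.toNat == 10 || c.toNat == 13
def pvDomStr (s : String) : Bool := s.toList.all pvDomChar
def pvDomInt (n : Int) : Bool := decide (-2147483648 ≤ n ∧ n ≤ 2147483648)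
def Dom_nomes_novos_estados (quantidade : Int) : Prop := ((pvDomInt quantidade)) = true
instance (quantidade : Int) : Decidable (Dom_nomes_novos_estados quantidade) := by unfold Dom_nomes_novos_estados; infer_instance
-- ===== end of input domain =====

-- B replaces A's per-element division/remainder indexing with nested loops over the
-- alphabet (outer enumerate gives the prefix, inner gives the letter) with an early-exit
-- length check (objective: alternative).


-- ===== PORT A =====
-- letras = list(string.ascii_uppercase); del letras[18]; letras.insert(0, 'S')
def letrasA : List Char :=
  (("ABCDEFGHIJKLMNOPQRSTUVWXYZ".toList).eraseIdx 18).insertIdx 0 'S'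

-- the body of A's loop for one i (letras[...] is in range for every i the loop
-- produces under the assert, so pyGetD's default is never used inside Pre_)
def corpoA (i : Int) : String :=
  let indice_prefixo : Int := PySem.Int.floordiv i (letrasA.length : Int)
  let indice_letra : Int := i - indice_prefixo * (letrasA.length : Int)
  let prefixo : List Char :=
    if 0 < indice_prefixo then [PySem.List.pyGetD letrasA indice_prefixo 'A'] else []
  let letra : Char := PySem.List.pyGetD letrasA indice_letra 'A'
  String.ofList (prefixo ++ [letra])

def nomes_novos_estados (quantidade : Int) : List String :=
  (PySem.List.pyRange 0 quantidade 1).foldl (fun lista i => lista ++ [corpoA i]) []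

-- ===== PORT B =====
def letrasB : List Char :=
  (("ABCDEFGHIJKLMNOPQRSTUVWXYZ".toList).eraseIdx 18).insertIdx 0 'S'

-- inner loop: for letra in letras: if len(lista) >= quantidade: return lista; lista.append(...)
-- second component: true = the early 'return lista' was taken
def innerB (prefixo : List Char) (q : Int) : List Char → List String → (List String × Bool)
  | [], lista => (lista, false)
  | letra :: rest, lista =>
      if q ≤ (lista.length : Int) then (lista, true)
      else innerB prefixo q rest (lista ++ [String.ofList (prefixo ++ [letra])])

-- outer loop: for p, c in enumerate(letras): prefixo = '' if p == 0 else c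
def outerB (q : Int) : List (Int × Char) → List String → List String
  | [], lista => lista
  | (p, c) :: rest, lista =>
      match innerB (if p == 0 then [] else [c]) q letrasB lista with
      | (lista', true) => lista'
      | (lista', false) => outerB q rest lista'

def nomes_novos_estados_alt (quantidade : Int) : List String :=
  outerB quantidade (PySem.List.enumerate letrasB) []

-- ===== PRECONDITION & SPEC =====
-- A's assert raises AssertionError for quantidade > 676; those inputs are excluded.
def Pre_nomes_novos_estados (quantidade : Int) : Prop := quantidade ≤ 676
instance (quantidade : Int) : Decidable (Pre_nomes_novos_estados quantidade) := by
  unfold Pre_nomes_novos_estados; infer_instance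
def pvWitness_nomes_novos_estados : Int := (30)

def Spec_nomes_novos_estados (quantidade : Int) (out : List String) : Prop := out = nomes_novos_estados_alt quantidade
instance (quantidade : Int) (out : List String) : Decidable (Spec_nomes_novos_estados quantidade out) := by unfold Spec_nomes_novos_estados; infer_instance

-- ===== CLAIM (what is proved, stated in full; the proofs are below) =====
def Claim_equal_nomes_novos_estados : Prop := ∀ (quantidade : Int), Dom_nomes_novos_estados quantidade → Pre_nomes_novos_estados quantidade → Spec_nomes_novos_estados quantidade (nomes_novos_estados quantidade)

-- ===== LEMMAS AND PROOFS =====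

-- the (p,c)-block of names B's inner loop would append without the early exit
def blocoB (p : Int) (c : Char) : List String :=
  letrasB.map (fun letra => String.ofList ((if p == 0 then [] else [c]) ++ [letra]))

lemma innerB_exit (prefixo : List Char) (q : Int) (letra : Char) (rest : List Char)
    (lista : List String) (h : q ≤ (lista.length : Int)) :
    innerB prefixo q (letra :: rest) lista = (lista, true) := by
  simp [innerB, h]

lemma innerB_full (prefixo : List Char) (q : Int) :
    ∀ (ls : List Char) (lista : List String),
      (lista.length : Int) + ls.length ≤ q →
      innerB prefixo q ls lista
        = (lista ++ ls.map (fun letra => String.ofList (prefixo ++ [letra])), false) := by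
  intro ls
  induction ls with
  | nil => intro lista _; simp [innerB]
  | cons letra rest ih =>
      intro lista h
      have hlt : ¬ q ≤ (lista.length : Int) := by
        simp only [List.length_cons] at h; push_cast at h; omega
      have h' : (((lista ++ [String.ofList (prefixo ++ [letra])]).length : Int))
          + (rest.length : Int) ≤ q := by
        simp only [List.length_append, List.length_cons, List.length_nil] at *
        push_cast at *; omega
      rw [innerB, if_neg hlt, ih _ h']
      simp

lemma innerB_partial (prefixo : List Char) (q : Int) :
    ∀ (ls : List Char) (lista : List String),
      (lista.length : Int) ≤ q → q < (lista.length : Int) + ls.length →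
      innerB prefixo q ls lista
        = (lista ++ (ls.take (q - lista.length).toNat).map
              (fun letra => String.ofList (prefixo ++ [letra])), true) := by
  intro ls
  induction ls with
  | nil => intro lista h1 h2; simp at h2; omega
  | cons letra rest ih =>
      intro lista h1 h2
      by_cases hle : q ≤ (lista.length : Int)
      · have h0 : (q - (lista.length : Int)).toNat = 0 := by omega
        rw [innerB_exit _ _ _ _ _ hle, h0]
        simp
      · push_neg at hle
        rw [innerB, if_neg (by omega),
          ih _ (by simp; omega)
               (by simp only [List.length_append, List.length_cons, List.length_nil] at *; push_cast at *; omega)]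
        have htn : (q - (lista.length : Int)).toNat
            = ((q - ((lista ++ [String.ofList (prefixo ++ [letra])]).length : Int)).toNat) + 1 := by
          simp only [List.length_append, List.length_cons, List.length_nil]
          push_cast; omega
        rw [htn]
        simp [List.take_succ_cons]

lemma letrasB_ne_nil : letrasB ≠ [] := by decide

lemma letrasB_len : (letrasB.length : Int) = 26 := by decide

lemma outerB_spec (q : Int) :
    ∀ (ps : List (Int × Char)) (lista : List String),
      outerB q ps lista
        = lista ++ (ps.flatMap (fun pc => blocoB pc.1 pc.2)).take (q - lista.length).toNat := by
  intro ps
  induction ps with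
  | nil => intro lista; simp [outerB]
  | cons pc rest ih =>
      obtain ⟨p, c⟩ := pc
      intro lista
      by_cases h1 : q ≤ (lista.length : Int)
      · -- immediate early return
        obtain ⟨l0, ls0, hls⟩ : ∃ l0 ls0, letrasB = l0 :: ls0 := by
          cases hh : letrasB with
          | nil => exact absurd hh letrasB_ne_nil
          | cons a b => exact ⟨a, b, rfl⟩
        have h0 : (q - (lista.length : Int)).toNat = 0 := by omega
        rw [outerB, hls, innerB_exit _ _ _ _ _ h1, h0]
        simp
      · push_neg at h1
        by_cases h2 : q < (lista.length : Int) + 26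
        · -- partial block, early return inside
          rw [outerB, innerB_partial _ q letrasB lista (le_of_lt h1)
            (by rw [letrasB_len]; omega)]
          have hle : (q - (lista.length : Int)).toNat ≤ (blocoB p c).length := by
            simp only [blocoB, List.length_map]
            have := letrasB_len; omega
          rw [List.flatMap_cons, List.take_append_of_le_length hle, blocoB,
            ← List.map_take]
        · -- full block, continue to the next prefix
          push_neg at h2
          rw [outerB, innerB_full _ q letrasB lista (by rw [letrasB_len]; omega)]
          have hb26 : ((blocoB p c).length : Int) = 26 := by
            simp only [blocoB, List.length_map]; exact letrasB_len
          have key : lista ++ blocoB p c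
                ++ (List.flatMap (fun pc => blocoB pc.1 pc.2) rest).take
                     ((q - (((lista ++ blocoB p c).length : Nat) : Int)).toNat)
              = lista ++ (List.flatMap (fun pc => blocoB pc.1 pc.2) ((p, c) :: rest)).take
                  ((q - ((lista.length : Nat) : Int)).toNat) := by
            have h1' : (blocoB p c).take (q - (lista.length : Int)).toNat = blocoB p c := by
              apply List.take_of_length_le; omega
            have h2' : (q - ((lista ++ blocoB p c).length : Int)).toNat
                = (q - (lista.length : Int)).toNat - (blocoB p c).length := by
              simp only [List.length_append]; push_cast; omega
            rw [List.flatMap_cons, List.take_append, h1', h2', List.append_assoc]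
          exact (ih (lista ++ blocoB p c)).trans key

-- the complete 676-name list and its closed form as a map of A's loop body
def fullB : List String :=
  (PySem.List.enumerate letrasB).flatMap (fun pc => blocoB pc.1 pc.2)

set_option maxRecDepth 40000 in
set_option maxHeartbeats 2000000 in
lemma fullB_eq : fullB = (List.range 676).map (fun k : Nat => corpoA (k : Int)) := by decide

lemma altB_take (q : Int) : nomes_novos_estados_alt q = fullB.take q.toNat := by
  rw [nomes_novos_estados_alt, outerB_spec, ← fullB]
  simp

lemma A_map (q : Int) :
    nomes_novos_estados q = (List.range q.toNat).map (fun k : Nat => corpoA (k : Int)) := by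
  rw [nomes_novos_estados, PySem.List.pyRange_one, List.foldl_map,
    PySem.List.foldl_append_singleton_eq_map]
  simp

-- ===== VERDICT (by name: the statement is the Claim_ definition above) =====
theorem nomes_novos_estados_spec : Claim_equal_nomes_novos_estados := by
  intro q _ hpre
  unfold Spec_nomes_novos_estados
  rw [A_map, altB_take, fullB_eq, ← List.map_take, List.take_range]
  have hmin : min q.toNat 676 = q.toNat := by
    unfold Pre_nomes_novos_estados at hpre; omega
  rw [hmin]
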